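-- pv_equiv track=rewrite | github.com/prd-xxx/yurufuwa_onsite_04 | strange_clock/Tallfall_AC/main.py | t2
-- ===== SOURCE A (Python) =====
-- def t2(T):
--     M = len(T) - 1
--     prime = [1]*(M+1)
--     prime[0] = None
--     prime[1] = None
--     for p in range(2, M+1):
--         if prime[p]:
--             for np in range(2*p, M+1, p):
--                 prime[np] = 0
--             for t in range(0, M+1, p):
--                 T[t//p] -= T[t]
--     return T
-- ===== SOURCE B (Python) =====
-- def t2(T):
--     # Multiplicative-shift transform: for each prime p (ascending), replace the prefix
--     # T[0..M//p] at once by T[k] - T[k*p], computed simultaneously from the current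
--     # array via one slice assignment. Primes found by trial division.
--     M = len(T) - 1
--
--     def is_prime(p):
--         d = 2
--         while d * d <= p:
--             if p % d == 0:
--                 return False
--             d += 1
--         return p >= 2
--
--     for p in range(2, M + 1):
--         if is_prime(p):
--             T[:M // p + 1] = [T[k] - T[k * p] for k in range(M // p + 1)]
--     return T
-- ===== Notes on version B (the rewrite author's own statement) =====
-- stated objective: alternative
-- what changed: A sieves primes with a shared mark array and, per prime, walks multiples doing sequential in-place strided subtractions T[t//p] -= T[t]; B tests each p for primality by trial division (no sieve state) and per prime rebuilds the changed prefix in one simultaneous slice assignment T[:M//p+1] = [T[k] - T[k*p] ...]. Pre_ excludes lists of length <= 1, on which A raises IndexError while initialising its sieve.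
import Mathlib
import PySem

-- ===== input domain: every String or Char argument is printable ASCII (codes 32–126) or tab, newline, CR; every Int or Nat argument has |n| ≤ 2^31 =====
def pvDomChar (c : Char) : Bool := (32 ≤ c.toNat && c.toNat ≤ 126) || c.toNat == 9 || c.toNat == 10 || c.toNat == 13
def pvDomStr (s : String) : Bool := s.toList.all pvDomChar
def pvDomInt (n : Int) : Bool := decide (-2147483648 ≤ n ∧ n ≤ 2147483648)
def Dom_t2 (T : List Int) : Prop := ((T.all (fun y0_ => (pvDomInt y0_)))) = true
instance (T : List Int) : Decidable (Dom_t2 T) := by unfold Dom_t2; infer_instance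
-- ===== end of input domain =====

-- B replaces A's prime sieve + sequential in-place strided subtractions by trial-division
-- primality and one simultaneous array rebuild per prime; both Pythons mutate the argument
-- list in place on every input admitted by Pre_t2, and the proved equivalence is about the
-- return value.

-- ===== PORT A =====
-- range(a, b, p) over naturals, exact for 0 < p and the nonnegative bounds used here
def pyRangeNat (a b p : Nat) : List Nat := List.range' a ((b - a + (p - 1)) / p) p

-- Python truthiness of the sieve entries (None and 0 falsy, 1 truthy)
def truthyOI (o : Option Int) : Bool := match o with
  | some v => v != 0
  | none => false

def t2 (T : List Int) : List Int :=
  let M := T.length - 1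
  let prime0 : List (Option Int) := ((List.replicate (M + 1) (some (1 : Int))).set 0 none).set 1 none
  let res := (pyRangeNat 2 (M + 1) 1).foldl
    (fun (s : List (Option Int) × List Int) p =>
      if truthyOI (s.1.getD p none) then
        ((pyRangeNat (2 * p) (M + 1) p).foldl (fun pr np => pr.set np (some 0)) s.1,
         (pyRangeNat 0 (M + 1) p).foldl
           (fun L t => L.set (t / p) (L.getD (t / p) 0 - L.getD t 0)) s.2)
      else s)
    (prime0, T)
  res.2

-- ===== PORT B =====
-- Source B's `while d * d <= p: if p % d == 0: return False; d += 1` then `return p >= 2`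
def isPrimeGo (p d : Nat) : Bool :=
  if d * d ≤ p then
    if p % d = 0 then false else isPrimeGo p (d + 1)
  else decide (2 ≤ p)
termination_by p + 2 - d
decreasing_by
  rename_i h
  rcases Nat.eq_zero_or_pos d with rfl | hd0
  · omega
  · have : d ≤ d * d := Nat.le_mul_of_pos_left d hd0
    omega

def t2_alt (T : List Int) : List Int :=
  let M := T.length - 1
  (pyRangeNat 2 (M + 1) 1).foldl
    (fun L p =>
      if isPrimeGo p 2 then
        (List.range (M / p + 1)).map (fun k => L.getD k 0 - L.getD (k * p) 0)
          ++ L.drop (M / p + 1)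
      else L) T

-- ===== PRECONDITION & SPEC =====
-- Pre_t2 excludes lists of length ≤ 1, on which A raises IndexError while building its sieve.
def Pre_t2 (T : List Int) : Prop := 2 ≤ T.length
instance (T : List Int) : Decidable (Pre_t2 T) := by unfold Pre_t2; infer_instance

def pvWitness_t2 : List Int := [3, 1, 4, 1, 5]

def Spec_t2 (T : List Int) (out : List Int) : Prop := out = t2_alt T
instance (T : List Int) (out : List Int) : Decidable (Spec_t2 T out) := by unfold Spec_t2; infer_instance

-- ===== CLAIM (what is proved, stated in full; the proofs are below) =====
def Claim_equal_t2 : Prop := ∀ (T : List Int), Dom_t2 T → Pre_t2 T → Spec_t2 T (t2 T)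

-- ===== LEMMAS AND PROOFS =====

-- ---- generic list helpers ----
theorem pvGetD_set {α : Type} (L : List α) (i j : Nat) (v d : α) :
    (L.set i v).getD j d = if i = j ∧ i < L.length then v else L.getD j d := by
  by_cases h : i = j
  · subst h
    by_cases hl : i < L.length
    · simp [hl]
    · rw [List.set_eq_of_length_le (by omega)]
      simp [hl]
  · simp [h]

-- ---- pyRangeNat characterizations ----
theorem pyRangeNat_one (a b : Nat) : pyRangeNat a b 1 = List.range' a (b - a) := by
  simp [pyRangeNat]

theorem mem_pyRangeNat {p : Nat} (hp : 0 < p) (a b q : Nat) :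
    q ∈ pyRangeNat a b p ↔ a ≤ q ∧ q < b ∧ p ∣ (q - a) := by
  unfold pyRangeNat
  rw [List.mem_range']
  constructor
  · rintro ⟨i, hi, rfl⟩
    have hcomm : p * i = i * p := Nat.mul_comm p i
    have h1 : (i + 1) * p ≤ b - a + (p - 1) := by
      calc (i + 1) * p ≤ ((b - a + (p - 1)) / p) * p := Nat.mul_le_mul_right p hi
        _ ≤ b - a + (p - 1) := Nat.div_mul_le_self _ _
    have h2 : (i + 1) * p = i * p + p := Nat.succ_mul i p
    exact ⟨by omega, by omega, ⟨i, by omega⟩⟩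
  · rintro ⟨h1, h2, i, hi⟩
    have hcomm : p * i = i * p := Nat.mul_comm p i
    have h3 : (i + 1) * p = i * p + p := Nat.succ_mul i p
    have hle : (i + 1) * p ≤ b - a + (p - 1) := by omega
    have := (Nat.le_div_iff_mul_le hp (x := i + 1) (y := b - a + (p - 1))).2 hle
    exact ⟨i, by omega, by omega⟩

theorem range'_zero_step (p c : Nat) :
    List.range' 0 c p = (List.range c).map (fun i => i * p) := by
  induction c with
  | zero => simp
  | succ c ih => rw [List.range'_concat, List.range_succ, List.map_append, ih]; simp [Nat.mul_comm]

theorem pyRangeNat_multiples (M p : Nat) (hp : 0 < p) :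
    pyRangeNat 0 (M + 1) p = (List.range (M / p + 1)).map (fun i => i * p) := by
  unfold pyRangeNat
  rw [← range'_zero_step]
  congr 1
  have : M + 1 - 0 + (p - 1) = M + p := by omega
  rw [this, Nat.add_div_right _ hp]

-- ---- fold lemmas ----
-- marking fold (sieve inner loop)
theorem foldMark_spec (ms : List Nat) (P : List (Option Int)) :
    (ms.foldl (fun pr np => pr.set np (some 0)) P).length = P.length ∧
    ∀ q, (ms.foldl (fun pr np => pr.set np (some 0)) P).getD q none =
      if q ∈ ms ∧ q < P.length then some 0 else P.getD q none := by
  induction ms generalizing P with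
  | nil => simp
  | cons a ms ih =>
    obtain ⟨ihl, ihv⟩ := ih (P.set a (some 0))
    simp only [List.foldl_cons]
    refine ⟨by simp [ihl], fun q => ?_⟩
    rw [ihv q, List.length_set, pvGetD_set]
    simp only [List.mem_cons]
    by_cases h2 : q < P.length
    · by_cases h1 : q ∈ ms
      · simp [h1, h2]
      · by_cases h3 : a = q
        · subst h3
          simp [h1, h2]
        · simp [h1, h2, h3, Ne.symm h3]
    · by_cases h3 : a = q
      · subst h3
        simp [h2]
      · simp [h2, h3]

-- A's inner T-update loop: sequential in-place pass = simultaneous update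
theorem foldT_spec (p : Nat) (hp : 2 ≤ p) (L : List Int) (c : Nat) (hc : c ≤ L.length) :
    (((List.range c).map (fun i => i * p)).foldl
        (fun L t => L.set (t / p) (L.getD (t / p) 0 - L.getD t 0)) L).length = L.length ∧
    ∀ j, (((List.range c).map (fun i => i * p)).foldl
        (fun L t => L.set (t / p) (L.getD (t / p) 0 - L.getD t 0)) L).getD j 0 =
      if j < c then L.getD j 0 - L.getD (j * p) 0 else L.getD j 0 := by
  induction c with
  | zero => simp
  | succ c ih =>
    obtain ⟨ihl, ihv⟩ := ih (by omega)
    rw [List.range_succ, List.map_append, List.foldl_append]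
    simp only [List.map_cons, List.map_nil, List.foldl_cons, List.foldl_nil]
    have hdiv : c * p / p = c := Nat.mul_div_cancel c (by omega)
    rw [hdiv]
    have hcl : c < L.length := by omega
    have hcp : ¬ (c * p < c) := by
      have : c ≤ c * p := Nat.le_mul_of_pos_right c (by omega)
      omega
    refine ⟨by rw [List.length_set, ihl], fun j => ?_⟩
    rw [pvGetD_set, ihl]
    by_cases hj : c = j
    · subst hj
      rw [if_pos ⟨rfl, hcl⟩, if_pos (by omega), ihv c, ihv (c * p),
        if_neg (by omega), if_neg hcp]
    · rw [if_neg (by simp [hj]), ihv j]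
      by_cases hjc : j < c
      · rw [if_pos hjc, if_pos (by omega)]
      · rw [if_neg hjc, if_neg (by omega)]

-- ---- sieve correctness ----
abbrev markedAt (c q : Nat) : Prop := ∃ r < c, Nat.Prime r ∧ r ∣ q ∧ q ≠ r

def sieveSpec (n c : Nat) (P : List (Option Int)) : Prop :=
  P.length = n ∧ ∀ q, P.getD q none =
    if q < n then (if q ≤ 1 then none else if markedAt c q then some 0 else some 1) else none

theorem marked_self_iff (c : Nat) (hc : 2 ≤ c) : markedAt c c ↔ ¬ Nat.Prime c := by
  constructor
  · rintro ⟨r, hrc, hrp, hrd, hne⟩ hcp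
    rcases hcp.eq_one_or_self_of_dvd r hrd with rfl | rfl
    · exact Nat.not_prime_one hrp
    · exact hne rfl
  · intro hcp
    refine ⟨c.minFac, ?_, Nat.minFac_prime (by omega), Nat.minFac_dvd c, ?_⟩
    · have h1 : c.minFac ≤ c := Nat.le_of_dvd (by omega) (Nat.minFac_dvd c)
      have h2 : c.minFac ≠ c := fun h => hcp (Nat.prime_def_minFac.2 ⟨hc, h⟩)
      omega
    · intro h
      exact hcp (Nat.prime_def_minFac.2 ⟨hc, h.symm⟩)

theorem markedAt_succ (c q : Nat) :
    markedAt (c + 1) q ↔ markedAt c q ∨ (Nat.Prime c ∧ c ∣ q ∧ q ≠ c) := by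
  unfold markedAt
  constructor
  · rintro ⟨r, hrc, h⟩
    rcases Nat.lt_or_ge r c with h' | h'
    · exact Or.inl ⟨r, h', h⟩
    · have : r = c := by omega
      subst this
      exact Or.inr h
  · rintro (⟨r, hrc, h⟩ | h)
    · exact ⟨r, by omega, h⟩
    · exact ⟨c, by omega, h⟩

theorem dvd_shift (c q : Nat) (h2 : 2 * c ≤ q) : c ∣ q - 2 * c ↔ c ∣ q := by
  have hc2 : c ∣ 2 * c := ⟨2, by ring⟩
  constructor
  · intro h
    have := Nat.dvd_add h hc2
    rwa [Nat.sub_add_cancel h2] at this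
  · intro h
    exact Nat.dvd_sub h hc2

-- the A-side loop body and its iterates (proof-side names for the folds inside t2)
def bodyA (n : Nat) (s : List (Option Int) × List Int) (p : Nat) : List (Option Int) × List Int :=
  if truthyOI (s.1.getD p none) then
    ((pyRangeNat (2 * p) (n - 1 + 1) p).foldl (fun pr np => pr.set np (some 0)) s.1,
     (pyRangeNat 0 (n - 1 + 1) p).foldl
       (fun L t => L.set (t / p) (L.getD (t / p) 0 - L.getD t 0)) s.2)
  else s

def primeInit (n : Nat) : List (Option Int) :=
  ((List.replicate (n - 1 + 1) (some (1 : Int))).set 0 none).set 1 none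

def iterA (T : List Int) (c : Nat) : List (Option Int) × List Int :=
  (List.range' 2 (c - 2)).foldl (bodyA T.length) (primeInit T.length, T)

theorem t2_eq_iterA (T : List Int) : t2 T = (iterA T T.length).2 := by
  have h : T.length - 1 + 1 - 2 = T.length - 2 := by omega
  simp only [t2, iterA, primeInit, pyRangeNat_one, h]
  rfl

-- the B-side loop body and its iterates (proof-side names for the fold inside t2_alt)
def bodyB (n : Nat) (L : List Int) (p : Nat) : List Int :=
  if isPrimeGo p 2 then
    (List.range ((n - 1) / p + 1)).map (fun k => L.getD k 0 - L.getD (k * p) 0)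
      ++ L.drop ((n - 1) / p + 1)
  else L

def iterB (T : List Int) (c : Nat) : List Int :=
  (List.range' 2 (c - 2)).foldl (bodyB T.length) T

theorem t2_alt_eq_iterB (T : List Int) : t2_alt T = iterB T T.length := by
  have h : T.length - 1 + 1 - 2 = T.length - 2 := by omega
  simp only [t2_alt, iterB, pyRangeNat_one, h]
  rfl

theorem sieveSpec_init (n : Nat) (hn : 2 ≤ n) : sieveSpec n 2 (primeInit n) := by
  have hM : n - 1 + 1 = n := by omega
  refine ⟨by simp [primeInit, hM], fun q => ?_⟩
  have hmark : ¬ markedAt 2 q := by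
    rintro ⟨r, hr2, hrp, -, -⟩
    have := hrp.two_le
    omega
  unfold primeInit
  rw [hM, pvGetD_set]
  simp only [List.length_set, List.length_replicate]
  by_cases h1 : q = 1
  · subst h1
    rw [if_pos ⟨rfl, by omega⟩, if_pos (by omega), if_pos (by omega)]
  · rw [if_neg (by simp [Ne.symm h1])]
    rw [pvGetD_set]
    simp only [List.length_replicate]
    by_cases h0 : q = 0
    · subst h0
      rw [if_pos ⟨rfl, by omega⟩, if_pos (by omega), if_pos (by omega)]
    · rw [if_neg (by simp [Ne.symm h0])]
      rw [List.getD_eq_getElem?_getD, List.getElem?_replicate]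
      by_cases hq : q < n <;>
        simp [hq, hmark, show ¬ q ≤ 1 by omega]

-- ---- trial division = primality ----
theorem isPrimeGo_spec (p : Nat) : ∀ (d : Nat),
    isPrimeGo p d = true ↔ (2 ≤ p ∧ ∀ e, d ≤ e → e * e ≤ p → ¬ e ∣ p) := by
  have main : ∀ (fuel d : Nat), p + 2 - d ≤ fuel →
      (isPrimeGo p d = true ↔ (2 ≤ p ∧ ∀ e, d ≤ e → e * e ≤ p → ¬ e ∣ p)) := by
    intro fuel
    induction fuel with
    | zero =>
      intro d hf
      have hdp : p + 2 ≤ d := by omega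
      have hbig : ¬ d * d ≤ p := by
        have h1 : d ≤ d * d := Nat.le_mul_of_pos_left d (by omega)
        omega
      rw [isPrimeGo, if_neg hbig]
      simp only [decide_eq_true_eq]
      constructor
      · intro h2
        refine ⟨h2, fun e he1 he2 _ => ?_⟩
        have : d * d ≤ e * e := Nat.mul_le_mul he1 he1
        omega
      · exact fun h => h.1
    | succ fuel ih =>
      intro d hf
      by_cases hdd : d * d ≤ p
      · by_cases hmod : p % d = 0
        · rw [isPrimeGo, if_pos hdd, if_pos hmod]
          simp only [Bool.false_eq_true, false_iff]
          rintro ⟨hp2, hall⟩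
          by_cases hd0 : d = 0
          · subst hd0
            simp at hdd
            omega
          · exact hall d (le_refl d) hdd (Nat.dvd_of_mod_eq_zero hmod)
        · rw [isPrimeGo, if_pos hdd, if_neg hmod, ih (d + 1) (by omega)]
          constructor
          · rintro ⟨hp2, hall⟩
            refine ⟨hp2, fun e he1 he2 hde => ?_⟩
            rcases Nat.lt_or_ge d e with h' | h'
            · exact hall e (by omega) he2 hde
            · have hed : e = d := by omega
              subst hed
              rcases Nat.eq_zero_or_pos e with rfl | hd0
              · have : p = 0 := Nat.eq_zero_of_zero_dvd hde
                simp [this] at hmod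
              · exact hmod (Nat.mod_eq_zero_of_dvd hde)
          · rintro ⟨hp2, hall⟩
            exact ⟨hp2, fun e he1 he2 hde => hall e (by omega) he2 hde⟩
      · rw [isPrimeGo, if_neg hdd]
        simp only [decide_eq_true_eq]
        constructor
        · intro h2
          refine ⟨h2, fun e he1 he2 _ => ?_⟩
          have : d * d ≤ e * e := Nat.mul_le_mul he1 he1
          omega
        · exact fun h => h.1
  intro d
  exact main (p + 2 - d) d (le_refl _)

theorem isPrimeB_iff (p : Nat) : isPrimeGo p 2 = true ↔ Nat.Prime p := by
  rw [isPrimeGo_spec p 2, Nat.prime_def_lt']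
  constructor
  · rintro ⟨hp2, hall⟩
    refine ⟨hp2, fun m hm1 hm2 hmd => ?_⟩
    obtain ⟨t, ht⟩ := hmd
    have ht2 : 2 ≤ t := by
      rcases t with _ | _ | t
      · omega
      · omega
      · omega
    by_cases hsq : m * m ≤ p
    · exact hall m hm1 hsq ⟨t, ht⟩
    · have htm : t < m := by
        by_contra h
        have : m * m ≤ m * t := Nat.mul_le_mul_left m (by omega)
        omega
      have hts : t * t ≤ p := by
        have h1 : t * t < m * t := Nat.mul_lt_mul_of_lt_of_le htm (le_refl t) (by omega)
        omega
      exact hall t ht2 hts ⟨m, by rw [ht]; ring⟩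
  · rintro ⟨hp2, hall⟩
    refine ⟨hp2, fun e he1 he2 hde => ?_⟩
    have helt : e < p := by
      have : e * 2 ≤ e * e := Nat.mul_le_mul_left e he1
      by_contra h
      have hep : e = p := Nat.le_antisymm (Nat.le_of_dvd (by omega) hde) (by omega)
      omega
    exact hall e he1 helt hde

-- ---- per-prime step: A's sequential strided pass = B's simultaneous rebuild ----
theorem step_eq (L : List Int) (M p : Nat) (hp : 2 ≤ p) (hL : L.length = M + 1) :
    (pyRangeNat 0 (M + 1) p).foldl
        (fun L t => L.set (t / p) (L.getD (t / p) 0 - L.getD t 0)) L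
    = (List.range (M / p + 1)).map (fun k => L.getD k 0 - L.getD (k * p) 0)
        ++ L.drop (M / p + 1) := by
  have hc : M / p + 1 ≤ L.length := by
    rw [hL]; have := Nat.div_le_self M p; omega
  rw [pyRangeNat_multiples M p (by omega)]
  obtain ⟨hlen, hval⟩ := foldT_spec p hp L (M / p + 1) hc
  refine List.ext_getElem (by
    rw [hlen, List.length_append, List.length_map, List.length_range, List.length_drop]
    omega) ?_
  intro j h1 h2
  have hjL : j < L.length := by rw [hlen] at h1; exact h1
  rw [← List.getD_eq_getElem _ 0 h1, hval j]
  by_cases hk : j < M / p + 1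
  · rw [if_pos hk, List.getElem_append_left (by simpa using hk),
      List.getElem_map, List.getElem_range]
  · rw [if_neg hk,
      List.getElem_append_right (by simp; omega)]
    simp only [List.length_map, List.length_range]
    rw [List.getElem_drop, List.getD_eq_getElem L 0 hjL]
    congr 1
    omega

-- the combined outer-loop invariant
theorem outer_spec (T : List Int) (hn : 2 ≤ T.length) : ∀ (c : Nat), 2 ≤ c → c ≤ T.length →
    sieveSpec T.length c (iterA T c).1 ∧
    (iterA T c).2 = iterB T c ∧ (iterB T c).length = T.length := by
  have hM : T.length - 1 + 1 = T.length := by omega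
  intro c
  induction c with
  | zero => omega
  | succ c ih =>
    intro hc2 hcn
    by_cases hbase : c + 1 = 2
    · have hc1 : c = 1 := by omega
      subst hc1
      exact ⟨sieveSpec_init T.length hn, rfl, rfl⟩
    · have hc2' : 2 ≤ c := by omega
      obtain ⟨⟨hPl, hPv⟩, heq, hBl⟩ := ih hc2' (by omega)
      have hstep : List.range' 2 (c + 1 - 2) = List.range' 2 (c - 2) ++ [c] := by
        have h1 : c + 1 - 2 = (c - 2) + 1 := by omega
        rw [h1, List.range'_concat, one_mul]
        have h2 : 2 + (c - 2) = c := by omega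
        rw [h2]
      have hiterA : iterA T (c + 1) = bodyA T.length (iterA T c) c := by
        rw [iterA, hstep, List.foldl_append]
        rfl
      have hiterB : iterB T (c + 1) = bodyB T.length (iterB T c) c := by
        rw [iterB, hstep, List.foldl_append]
        rfl
      have hgetc : (iterA T c).1.getD c none = if markedAt c c then some 0 else some 1 := by
        rw [hPv c, if_pos (by omega), if_neg (by omega)]
      by_cases hpr : Nat.Prime c
      · -- prime step
        have hmm : ¬ markedAt c c := fun h => ((marked_self_iff c hc2').1 h) hpr
        have htr : truthyOI ((iterA T c).1.getD c none) = true := by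
          rw [hgetc, if_neg hmm]
          decide
        have hprB : isPrimeGo c 2 = true := (isPrimeB_iff c).2 hpr
        have hbodyA : iterA T (c + 1) =
            ((pyRangeNat (2 * c) (T.length - 1 + 1) c).foldl
                (fun pr np => pr.set np (some 0)) (iterA T c).1,
             (pyRangeNat 0 (T.length - 1 + 1) c).foldl
                (fun L t => L.set (t / c) (L.getD (t / c) 0 - L.getD t 0)) (iterA T c).2) := by
          rw [hiterA, bodyA, htr]
          simp
        have hbodyB : iterB T (c + 1) =
            (List.range ((T.length - 1) / c + 1)).map
              (fun k => (iterB T c).getD k 0 - (iterB T c).getD (k * c) 0)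
              ++ (iterB T c).drop ((T.length - 1) / c + 1) := by
          rw [hiterB, bodyB, hprB]
          simp
        obtain ⟨hml, hmv⟩ := foldMark_spec (pyRangeNat (2 * c) (T.length - 1 + 1) c) (iterA T c).1
        have hT2 : (iterA T c).2 = iterB T c := heq
        have hTeq : (iterA T (c + 1)).2 = iterB T (c + 1) := by
          rw [hbodyA, hbodyB]
          simp only
          rw [hT2, step_eq (iterB T c) (T.length - 1) c hpr.two_le (by rw [hBl]; omega)]
        refine ⟨⟨?_, ?_⟩, hTeq, ?_⟩
        · rw [hbodyA]
          simp only
          rw [hml, hPl]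
        · intro q
          rw [hbodyA]
          simp only
          rw [hmv q, hPl]
          by_cases hqn : q < T.length
          · by_cases hq1 : q ≤ 1
            · have hnot : q ∉ pyRangeNat (2 * c) (T.length - 1 + 1) c := by
                rw [mem_pyRangeNat (by omega)]
                rintro ⟨ha, -, -⟩
                omega
              rw [if_neg (by simp [hnot]), hPv q, if_pos hqn, if_pos hq1, if_pos hqn, if_pos hq1]
            · have hmem : q ∈ pyRangeNat (2 * c) (T.length - 1 + 1) c ↔ (c ∣ q ∧ q ≠ c) := by
                rw [mem_pyRangeNat (by omega), hM]
                constructor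
                · rintro ⟨ha, hb, hd⟩
                  exact ⟨(dvd_shift c q ha).1 hd, by omega⟩
                · rintro ⟨⟨i, rfl⟩, hne⟩
                  have hi : 2 ≤ i := by
                    rcases i with _ | _ | i
                    · simp at hq1
                    · simp at hne
                    · omega
                  have h2c : 2 * c ≤ c * i := by
                    calc 2 * c = c * 2 := Nat.mul_comm 2 c
                      _ ≤ c * i := Nat.mul_le_mul_left c hi
                  exact ⟨h2c, hqn, (dvd_shift c (c * i) h2c).2 ⟨i, rfl⟩⟩
              rw [if_pos hqn, if_neg hq1]
              by_cases hd : c ∣ q ∧ q ≠ c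
              · rw [if_pos ⟨hmem.2 hd, hqn⟩,
                  if_pos ((markedAt_succ c q).2 (Or.inr ⟨hpr, hd⟩))]
              · rw [if_neg (fun hcon => hd (hmem.1 hcon.1)), hPv q, if_pos hqn, if_neg hq1]
                by_cases hmk : markedAt c q
                · rw [if_pos hmk, if_pos ((markedAt_succ c q).2 (Or.inl hmk))]
                · rw [if_neg hmk,
                    if_neg (fun h => ((markedAt_succ c q).1 h).elim hmk
                      (fun h2 => hd ⟨h2.2.1, h2.2.2⟩))]
          · have hnot : q ∉ pyRangeNat (2 * c) (T.length - 1 + 1) c := by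
              rw [mem_pyRangeNat (by omega)]
              rintro ⟨-, hb, -⟩
              omega
            rw [if_neg (by simp [hnot]), hPv q, if_neg hqn, if_neg hqn]
        · rw [hbodyB]
          have := Nat.div_le_self (T.length - 1) c
          simp only [List.length_append, List.length_map, List.length_range,
            List.length_drop, hBl]
          omega
      · -- composite step: nothing happens on either side
        have hmm : markedAt c c := (marked_self_iff c hc2').2 hpr
        have htr : truthyOI ((iterA T c).1.getD c none) = false := by
          rw [hgetc, if_pos hmm]
          decide
        have hprB : isPrimeGo c 2 = false := by
          rcases Bool.eq_false_or_eq_true (isPrimeGo c 2) with h | h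
          · exact absurd ((isPrimeB_iff c).1 h) hpr
          · exact h
        have hbodyA : iterA T (c + 1) = iterA T c := by
          rw [hiterA, bodyA, htr]
          simp
        have hbodyB : iterB T (c + 1) = iterB T c := by
          rw [hiterB, bodyB, hprB]
          simp
        refine ⟨⟨by rw [hbodyA]; exact hPl, ?_⟩, by rw [hbodyA, hbodyB]; exact heq,
          by rw [hbodyB]; exact hBl⟩
        intro q
        rw [hbodyA, hPv q]
        by_cases hqn : q < T.length
        · by_cases hq1 : q ≤ 1
          · rw [if_pos hqn, if_pos hq1, if_pos hqn, if_pos hq1]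
          · rw [if_pos hqn, if_neg hq1, if_pos hqn, if_neg hq1]
            by_cases hmk : markedAt c q
            · rw [if_pos hmk, if_pos ((markedAt_succ c q).2 (Or.inl hmk))]
            · rw [if_neg hmk, if_neg (fun h => ((markedAt_succ c q).1 h).elim hmk (fun hx => hpr hx.1))]
        · rw [if_neg hqn, if_neg hqn]

-- ===== VERDICT (by name: the statement is the Claim_ definition above) =====
theorem t2_spec : Claim_equal_t2 := by
  intro T _ hpre
  show t2 T = t2_alt T
  obtain ⟨-, heq, -⟩ := outer_spec T hpre T.length (by exact hpre) (le_refl _)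
  rw [t2_eq_iterA, t2_alt_eq_iterB, heq]
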